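-- pv_equiv track=rewrite | github.com/MrBrantCode/unitest_baseline | mut_generate/mist_train_taco/taco_4031/solution.py | find_special_integers
-- ===== SOURCE A (Python) =====
-- def find_special_integers(A: int, B: int, K: int) -> list[int]:
--     """
--     Find and return all integers between A and B (inclusive) that are either within the K smallest or K largest integers.
--
--     Parameters:
--     - A (int): The lower bound of the range (inclusive).
--     - B (int): The upper bound of the range (inclusive).
--     - K (int): The number of smallest and largest integers to consider.
--
--     Returns:
--     - list[int]: A list of integers that satisfy the condition, sorted in ascending order.
--     """
--     ans = []
--     for i in range(K):
--         if A <= A + i <= B: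
--             ans.append(A + i)
--         if A <= B - i <= B:
--             ans.append(B - i)
--     ans = list(set(ans))
--     ans.sort()
--     return ans
-- ===== SOURCE B (Python) =====
-- def find_special_integers(A: int, B: int, K: int) -> list[int]:
--     lo_end = min(A + K, B + 1)          # end of the K-smallest block (exclusive)
--     hi_start = max(B - K + 1, lo_end)   # start of the K-largest block, clipped past the first block
--     return list(range(A, lo_end)) + list(range(hi_start, B + 1))
-- ===== Notes on version B (the rewrite author's own statement) =====
-- stated objective: faster
-- what changed: B computes the two answer blocks' boundaries in closed form (lo_end = min(A+K, B+1), hi_start = max(B-K+1, lo_end)) and concatenates the two ascending ranges, replacing A's per-iteration range guards, set dedup and sort.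
import Mathlib
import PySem

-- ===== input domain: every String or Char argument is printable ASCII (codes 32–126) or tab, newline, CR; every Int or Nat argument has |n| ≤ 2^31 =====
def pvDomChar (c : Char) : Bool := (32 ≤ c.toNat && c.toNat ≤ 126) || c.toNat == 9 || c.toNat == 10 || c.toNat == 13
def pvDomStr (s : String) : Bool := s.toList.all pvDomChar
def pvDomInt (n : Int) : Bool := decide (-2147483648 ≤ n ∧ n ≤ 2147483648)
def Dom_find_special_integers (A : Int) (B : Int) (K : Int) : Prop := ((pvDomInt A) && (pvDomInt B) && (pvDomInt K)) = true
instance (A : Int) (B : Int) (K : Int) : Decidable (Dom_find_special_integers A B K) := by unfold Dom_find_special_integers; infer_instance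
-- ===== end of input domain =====

-- B computes the two answer blocks' boundaries in closed form and concatenates two ascending ranges, with no set-dedup and no sort; objective: faster (constant factor).

-- ===== PORT A =====
def find_special_integers (A : Int) (B : Int) (K : Int) : List Int :=
  let ans : List Int := []
  let ans := (PySem.List.pyRange 0 K 1).foldl (fun ans i =>
    let ans := if A ≤ A + i ∧ A + i ≤ B then ans ++ [A + i] else ans
    let ans := if A ≤ B - i ∧ B - i ≤ B then ans ++ [B - i] else ans
    ans) ans
  let ans := PySem.Set.ofList ans
  PySem.List.sorted ans (fun x => x) false

-- ===== PORT B =====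
def find_special_integers_alt (A : Int) (B : Int) (K : Int) : List Int :=
  let loEnd := min (A + K) (B + 1)
  let hiStart := max (B - K + 1) loEnd
  PySem.List.pyRange A loEnd 1 ++ PySem.List.pyRange hiStart (B + 1) 1

-- ===== PRECONDITION & SPEC =====
def Spec_find_special_integers (A : Int) (B : Int) (K : Int) (out : List Int) : Prop := out = find_special_integers_alt A B K
instance (A : Int) (B : Int) (K : Int) (out : List Int) : Decidable (Spec_find_special_integers A B K out) := by unfold Spec_find_special_integers; infer_instance

-- ===== CLAIM (what is proved, stated in full; the proofs are below) =====
def Claim_equal_find_special_integers : Prop := ∀ (A : Int) (B : Int) (K : Int), Dom_find_special_integers A B K → Spec_find_special_integers A B K (find_special_integers A B K)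

-- ===== LEMMAS AND PROOFS =====

-- membership in A's accumulation loop, by induction over the iterated range
theorem mem_fsi_loop (A B : Int) (l : List Int) (acc : List Int) (x : Int) :
    (x ∈ l.foldl (fun ans i =>
      let ans := if A ≤ A + i ∧ A + i ≤ B then ans ++ [A + i] else ans
      let ans := if A ≤ B - i ∧ B - i ≤ B then ans ++ [B - i] else ans
      ans) acc) ↔
    x ∈ acc ∨ ∃ i ∈ l, ((A ≤ A + i ∧ A + i ≤ B) ∧ x = A + i) ∨ ((A ≤ B - i ∧ B - i ≤ B) ∧ x = B - i) := by
  induction l generalizing acc with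
  | nil => simp
  | cons h t ih =>
    have hstep : ∀ acc' : List Int,
        (x ∈ (let a1 := if A ≤ A + h ∧ A + h ≤ B then acc' ++ [A + h] else acc'
              if A ≤ B - h ∧ B - h ≤ B then a1 ++ [B - h] else a1)) ↔
        x ∈ acc' ∨ ((A ≤ A + h ∧ A + h ≤ B) ∧ x = A + h) ∨ ((A ≤ B - h ∧ B - h ≤ B) ∧ x = B - h) := by
      intro acc'
      split_ifs <;> simp only [List.mem_append, List.mem_singleton] <;> tauto
    simp only [List.foldl_cons, ih, hstep, List.mem_cons]
    constructor
    · rintro ((hm | hc) | ⟨i, hi, hc⟩)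
      · exact Or.inl hm
      · exact Or.inr ⟨h, Or.inl rfl, hc⟩
      · exact Or.inr ⟨i, Or.inr hi, hc⟩
    · rintro (hm | ⟨i, rfl | hi, hc⟩)
      · exact Or.inl (Or.inl hm)
      · exact Or.inl (Or.inr hc)
      · exact Or.inr ⟨i, hi, hc⟩

-- x is produced by A's loop iff x ∈ [A,B] and is within K of an end
theorem mem_fsi_ans (A B K x : Int) :
    (x ∈ (PySem.List.pyRange 0 K 1).foldl (fun ans i =>
      let ans := if A ≤ A + i ∧ A + i ≤ B then ans ++ [A + i] else ans
      let ans := if A ≤ B - i ∧ B - i ≤ B then ans ++ [B - i] else ans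
      ans) []) ↔ (A ≤ x ∧ x < B + 1 ∧ (x - A < K ∨ B - x < K)) := by
  rw [mem_fsi_loop]
  simp only [List.mem_nil_iff, false_or]
  constructor
  · rintro ⟨i, hi, hc⟩
    rw [PySem.List.mem_pyRange_one] at hi
    rcases hc with ⟨hb, rfl⟩ | ⟨hb, rfl⟩ <;> omega
  · rintro ⟨h1, h2, h3 | h3⟩
    · exact ⟨x - A, PySem.List.mem_pyRange_one.mpr (by omega), Or.inl ⟨by omega, by omega⟩⟩
    · exact ⟨B - x, PySem.List.mem_pyRange_one.mpr (by omega), Or.inr ⟨by omega, by omega⟩⟩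

-- B's two ranges are disjoint, in order, and duplicate-free
theorem fsi_pairwise_append (A B K : Int) :
    (PySem.List.pyRange A (min (A + K) (B + 1)) 1 ++
     PySem.List.pyRange (max (B - K + 1) (min (A + K) (B + 1))) (B + 1) 1).Pairwise (· < ·) := by
  rw [List.pairwise_append]
  refine ⟨PySem.List.pairwise_lt_pyRange_one _ _, PySem.List.pairwise_lt_pyRange_one _ _, ?_⟩
  intro x hx y hy
  rw [PySem.List.mem_pyRange_one] at hx hy
  omega

theorem fsi_nodup_append (A B K : Int) :
    (PySem.List.pyRange A (min (A + K) (B + 1)) 1 ++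
     PySem.List.pyRange (max (B - K + 1) (min (A + K) (B + 1))) (B + 1) 1).Nodup :=
  (fsi_pairwise_append A B K).imp ne_of_lt

theorem find_special_integers_spec : Claim_equal_find_special_integers := by
  intro A B K _
  unfold Spec_find_special_integers find_special_integers find_special_integers_alt
  apply PySem.List.sorted_eq_of_perm_of_pairwise_lt
  · -- B's list is a permutation of set(ans)
    apply (List.perm_ext_iff_of_nodup
      (fsi_nodup_append A B K) (PySem.Set.nodup_ofList _)).mpr
    intro x
    rw [PySem.Set.mem_ofList, mem_fsi_ans A B K x, List.mem_append,
      PySem.List.mem_pyRange_one, PySem.List.mem_pyRange_one]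
    omega
  · exact fsi_pairwise_append A B K
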